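-- pv_equiv track=rewrite | github.com/nestessia/StaticFlow-diploma | staticflow/parsers/asciidoc.py | _extract_metadata_from_header
-- ===== SOURCE A (Python) =====
-- from typing import Dict, Any
--
-- def _extract_metadata_from_header(content: str) -> Dict[str, Any]:
--     """Извлекает метаданные из заголовка AsciiDoc документа."""
--     metadata = {}
--     lines = content.split('\n')
--
--     # Ищем метаданные в формате: `:key: value`
--     for line in lines:
--         if line.startswith(':') and ':' in line[1:]:
--             parts = line[1:].split(':', 1)
--             if len(parts) == 2:
--                 key = parts[0].strip()
--                 value = parts[1].strip()
--                 metadata[key] = value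
--         # Прекращаем поиск, если находим новый раздел
--         elif line.startswith('=') or not line.strip():
--             break
--
--     # Пытаемся получить заголовок
--     for line in lines:
--         if line.startswith('= '):
--             metadata['title'] = line[2:].strip()
--             break
--
--     return metadata
-- ===== SOURCE B (Python) =====
-- def _extract_metadata_from_header(content: str):
--     """One pass over the lines: a 'collecting' flag replaces A's first loop's break,
--     and the first '= ...' line seen supplies the title, replacing A's second loop."""
--     metadata = {}
--     collecting = True
--     title_found = False
--     for line in content.split('\n'):
--         if not title_found and line.startswith('= '):
--             metadata['title'] = line[2:].strip()
--             title_found = True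
--             collecting = False
--         elif collecting:
--             if line.startswith(':') and ':' in line[1:]:
--                 key, value = line[1:].split(':', 1)
--                 metadata[key.strip()] = value.strip()
--             elif line.startswith('=') or not line.strip():
--                 collecting = False
--     return metadata
-- ===== Notes on version B (the rewrite author's own statement) =====
-- stated objective: simpler
-- what changed: A's two sequential passes over the lines (metadata loop with break, then a fresh title scan) are merged into a single pass using two boolean state flags (still collecting metadata; title already found).
import Mathlib
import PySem

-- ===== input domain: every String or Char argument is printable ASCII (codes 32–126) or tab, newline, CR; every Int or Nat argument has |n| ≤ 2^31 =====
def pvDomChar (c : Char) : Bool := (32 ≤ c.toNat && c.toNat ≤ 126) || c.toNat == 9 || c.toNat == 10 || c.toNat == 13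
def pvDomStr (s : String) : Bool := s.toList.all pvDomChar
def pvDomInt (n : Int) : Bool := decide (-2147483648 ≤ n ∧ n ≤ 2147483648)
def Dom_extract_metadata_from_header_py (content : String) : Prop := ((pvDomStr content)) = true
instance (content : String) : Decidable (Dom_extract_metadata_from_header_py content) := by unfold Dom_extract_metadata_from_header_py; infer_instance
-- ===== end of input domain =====

-- B merges A's two sequential passes into a single flag-driven pass (objective: simpler, one traversal).

-- ===== PORT A =====
-- first loop: collect ':key: value' lines, break on a '='-line or a blank line
def pvA_meta : List (List Char) → PySem.Dict String String → PySem.Dict String String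
  | [], d => d
  | l :: rest, d =>
    if PySem.Chars.startswith l [':'] && PySem.Chars.isIn [':'] (PySem.List.slice l (some 1) none) then
      pvA_meta rest
        (match PySem.Chars.splitOnMax (PySem.List.slice l (some 1) none) [':'] 1 with
         | [p0, p1] =>
             d.insert (String.ofList (PySem.Chars.strip p0)) (String.ofList (PySem.Chars.strip p1))
         | _ => d)
    else if PySem.Chars.startswith l ['='] || (PySem.Chars.strip l == []) then d
    else pvA_meta rest d

-- second loop: first '= ' line gives the title
def pvA_title : List (List Char) → PySem.Dict String String → PySem.Dict String String
  | [], d => d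
  | l :: rest, d =>
    if PySem.Chars.startswith l ['=', ' '] then
      d.insert "title" (String.ofList (PySem.Chars.strip (PySem.List.slice l (some 2) none)))
    else pvA_title rest d

def extract_metadata_from_header_py (content : String) : List (String × String) :=
  let lines := PySem.Chars.splitOn content.toList ['\n']
  (pvA_title lines (pvA_meta lines PySem.Dict.empty)).items

-- ===== PORT B =====
-- one pass: state = (collecting, title_found, dict); the unreachable unpack-failure
-- case of 'key, value = line[1:].split(':', 1)' is rendered as 'd' (the ':' test forbids it)
def pvB_loop : List (List Char) → Bool → Bool → PySem.Dict String String → PySem.Dict String String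
  | [], _, _, d => d
  | l :: rest, collecting, found, d =>
    if !found && PySem.Chars.startswith l ['=', ' '] then
      pvB_loop rest false true
        (d.insert "title" (String.ofList (PySem.Chars.strip (PySem.List.slice l (some 2) none))))
    else if collecting then
      if PySem.Chars.startswith l [':'] && PySem.Chars.isIn [':'] (PySem.List.slice l (some 1) none) then
        pvB_loop rest collecting found
          (match PySem.Chars.splitOnMax (PySem.List.slice l (some 1) none) [':'] 1 with
           | [p0, p1] =>
               d.insert (String.ofList (PySem.Chars.strip p0)) (String.ofList (PySem.Chars.strip p1))
           | _ => d)
      else if PySem.Chars.startswith l ['='] || (PySem.Chars.strip l == []) then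
        pvB_loop rest false found d
      else pvB_loop rest collecting found d
    else pvB_loop rest collecting found d

def extract_metadata_from_header_py_alt (content : String) : List (String × String) :=
  (pvB_loop (PySem.Chars.splitOn content.toList ['\n']) true false PySem.Dict.empty).items

-- ===== PRECONDITION & SPEC =====
def Spec_extract_metadata_from_header_py (content : String) (out : List (String × String)) : Prop := out = extract_metadata_from_header_py_alt content
instance (content : String) (out : List (String × String)) : Decidable (Spec_extract_metadata_from_header_py content out) := by unfold Spec_extract_metadata_from_header_py; infer_instance

-- ===== CLAIM (what is proved, stated in full; the proofs are below) =====
def Claim_equal_extract_metadata_from_header_py : Prop := ∀ (content : String), Dom_extract_metadata_from_header_py content → Spec_extract_metadata_from_header_py content (extract_metadata_from_header_py content)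

-- ===== LEMMAS AND PROOFS =====

-- once the title is found (collecting already off), B changes nothing further
lemma pvB_dead (ls : List (List Char)) (d : PySem.Dict String String) :
    pvB_loop ls false true d = d := by
  induction ls with
  | nil => rfl
  | cons l rest ih => simp [pvB_loop, ih]

-- after the metadata break, B's remaining pass is exactly A's title loop
lemma pvB_title_phase (ls : List (List Char)) (d : PySem.Dict String String) :
    pvB_loop ls false false d = pvA_title ls d := by
  induction ls generalizing d with
  | nil => rfl
  | cons l rest ih =>
    by_cases ht : PySem.Chars.startswith l ['=', ' '] = true
    · simp [pvB_loop, pvA_title, ht, pvB_dead]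
    · simp [pvB_loop, pvA_title, ht, ih]

-- a line starting with "= " starts with "=" and not with ":"
lemma pv_title_shape (l : List Char) (ht : PySem.Chars.startswith l ['=', ' '] = true) :
    PySem.Chars.startswith l ['='] = true ∧ PySem.Chars.startswith l [':'] = false := by
  rw [PySem.Chars.startswith_iff] at ht
  obtain ⟨u, rfl⟩ := ht
  constructor <;> simp [PySem.Chars.startswith, List.isPrefixOf]

-- main invariant: B in its initial state = A's title loop after A's metadata loop
lemma pvB_main (ls : List (List Char)) (d : PySem.Dict String String) :
    pvB_loop ls true false d = pvA_title ls (pvA_meta ls d) := by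
  induction ls generalizing d with
  | nil => rfl
  | cons l rest ih =>
    by_cases ht : PySem.Chars.startswith l ['=', ' '] = true
    · obtain ⟨h1, h2⟩ := pv_title_shape l ht
      simp [pvB_loop, pvA_meta, pvA_title, ht, h1, h2, pvB_dead]
    · by_cases hc1 : (PySem.Chars.startswith l [':'] &&
          PySem.Chars.isIn [':'] (PySem.List.slice l (some 1) none)) = true
      · simp [pvB_loop, pvA_meta, pvA_title, ht, hc1, ih]
      · by_cases hc2 : PySem.Chars.startswith l ['='] = true ∨ PySem.Chars.strip l = []
        · simp [pvB_loop, pvA_meta, pvA_title, ht, hc1, hc2, pvB_title_phase]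
        · simp [pvB_loop, pvA_meta, pvA_title, ht, hc1, hc2, ih]

-- ===== VERDICT (by name: the statement is the Claim_ definition above) =====
theorem extract_metadata_from_header_py_spec : Claim_equal_extract_metadata_from_header_py := by
  intro content _
  unfold Spec_extract_metadata_from_header_py extract_metadata_from_header_py extract_metadata_from_header_py_alt
  rw [pvB_main]
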